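-- pv_equiv track=rewrite | github.com/KodCode-AI/kodcode | demo/SFT_KodCode_leetcode_100_1741214688/cross_verification_SFT_KodCode_leetcode_100_1741214688/Leetcode_00000049_C/trial_r1_2/solution.py | shortest_subarray_with_sum_at_least_target
-- ===== SOURCE A (Python) =====
-- from collections import deque
-- from typing import List
--
-- def shortest_subarray_with_sum_at_least_target(nums: List[int], target: int) -> int:
--     prefix = [0]
--     for num in nums:
--         prefix.append(prefix[-1] + num)
--
--     dq = deque()
--     min_len = float('inf')
--
--     for j in range(len(prefix)):
--         # Maintain the deque to keep indices with increasing prefix sums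
--         while dq and prefix[j] <= prefix[dq[-1]]:
--             dq.pop()
--         dq.append(j)
--
--         # Check for valid subarrays
--         while dq and (prefix[j] - prefix[dq[0]] >= target):
--             i = dq.popleft()
--             current_length = j - i
--             if current_length < min_len:
--                 min_len = current_length
--
--     return min_len if min_len != float('inf') else 0
-- ===== SOURCE B (Python) =====
-- def shortest_subarray_with_sum_at_least_target(nums, target):
--     prefix = [0]
--     s = 0
--     for x in nums:
--         s += x
--         prefix.append(s)
--     best = None
--     for j in range(len(prefix)):
--         for i in range(j + 1):
--             if prefix[j] - prefix[i] >= target and (best is None or j - i < best):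
--                 best = j - i
--     return best if best is not None else 0
-- ===== Notes on version B (the rewrite author's own statement) =====
-- stated objective: simpler
-- what changed: Replaces the monotonic-deque sliding-window algorithm with a direct brute-force minimum over all prefix-sum pairs (i,j), keeping a running sum instead of prefix[-1]; no deque, no invariant maintenance.
import Mathlib
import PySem

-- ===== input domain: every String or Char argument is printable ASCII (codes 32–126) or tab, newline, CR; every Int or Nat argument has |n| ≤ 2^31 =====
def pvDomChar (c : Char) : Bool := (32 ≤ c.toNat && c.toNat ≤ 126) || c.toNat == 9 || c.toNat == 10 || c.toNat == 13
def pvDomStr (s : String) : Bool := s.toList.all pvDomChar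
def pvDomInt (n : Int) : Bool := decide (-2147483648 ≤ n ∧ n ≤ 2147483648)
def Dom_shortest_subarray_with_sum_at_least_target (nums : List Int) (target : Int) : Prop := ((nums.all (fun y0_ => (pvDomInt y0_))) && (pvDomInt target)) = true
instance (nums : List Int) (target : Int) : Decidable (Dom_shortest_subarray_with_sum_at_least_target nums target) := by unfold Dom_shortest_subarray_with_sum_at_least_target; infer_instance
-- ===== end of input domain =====

-- B replaces A's monotonic-deque algorithm by a plain brute-force minimum over all prefix-sum pairs: simpler, not faster.
-- Both programs are pure (no observable mutation of the arguments).

-- ===== PORT A =====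
-- prefix = [0]; for num in nums: prefix.append(prefix[-1] + num)
def aPrefix (nums : List Int) : List Int :=
  nums.foldl (fun p num => p ++ [PySem.List.pyGetD p (-1) 0 + num]) [0]

-- while dq and prefix[j] <= prefix[dq[-1]]: dq.pop()   (the deque is a list; popping from the
-- right is expressed by recursing on the reversed list — exact, step for step)
def popBackRev (P : List Int) (pj : Int) : List Nat → List Nat
  | [] => []
  | b :: rest => if pj ≤ P.getD b 0 then popBackRev P pj rest else b :: rest

def popBack (P : List Int) (pj : Int) (dq : List Nat) : List Nat :=
  (popBackRev P pj dq.reverse).reverse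

-- while dq and (prefix[j] - prefix[dq[0]] >= target): i = dq.popleft(); … min_len update
-- min_len = float('inf') is represented as `none` (no other float arithmetic occurs — exact).
-- Deque indices are always < len(prefix), so prefix[i] is List.getD (never raises — exact).
def mlUpd (currentLength : Nat) : Option Nat → Option Nat
  | none => some currentLength
  | some m => if currentLength < m then some currentLength else some m

def popFront (P : List Int) (target pj : Int) (j : Nat) : List Nat → Option Nat → List Nat × Option Nat
  | [], ml => ([], ml)
  | i :: rest, ml =>
    if pj - P.getD i 0 ≥ target then
      popFront P target pj j rest (mlUpd (j - i) ml)
    else (i :: rest, ml)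

-- the body of `for j in range(len(prefix))`
def aStep (P : List Int) (target : Int) (s : List Nat × Option Nat) (j : Nat) : List Nat × Option Nat :=
  let dq1 := popBack P (P.getD j 0) s.1
  popFront P target (P.getD j 0) j (dq1 ++ [j]) s.2

def shortest_subarray_with_sum_at_least_target (nums : List Int) (target : Int) : Int :=
  let P := aPrefix nums
  let s := (List.range P.length).foldl (aStep P target) ([], none)
  match s.2 with
  | none => 0
  | some m => (m : Int)

-- ===== PORT B =====
-- prefix built with a running sum s
def bPrefix (nums : List Int) : List Int :=
  (nums.foldl (fun (sp : Int × List Int) x => (sp.1 + x, sp.2 ++ [sp.1 + x])) (0, [0])).2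

-- if prefix[j] - prefix[i] >= target and (best is None or j - i < best): best = j - i
def bUpd (P : List Int) (target : Int) (j : Nat) (acc : Option Nat) (i : Nat) : Option Nat :=
  if P.getD j 0 - P.getD i 0 ≥ target then
    match acc with
    | none => some (j - i)
    | some m => if j - i < m then some (j - i) else some m
  else acc

def shortest_subarray_with_sum_at_least_target_alt (nums : List Int) (target : Int) : Int :=
  let P := bPrefix nums
  let best := (List.range P.length).foldl
    (fun acc j => (List.range (j + 1)).foldl (fun acc2 i => bUpd P target j acc2 i) acc) none
  match best with
  | none => 0
  | some m => (m : Int)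

-- ===== PRECONDITION & SPEC =====
def Spec_shortest_subarray_with_sum_at_least_target (nums : List Int) (target : Int) (out : Int) : Prop := out = shortest_subarray_with_sum_at_least_target_alt nums target
instance (nums : List Int) (target : Int) (out : Int) : Decidable (Spec_shortest_subarray_with_sum_at_least_target nums target out) := by unfold Spec_shortest_subarray_with_sum_at_least_target; infer_instance

-- ===== CLAIM (what is proved, stated in full; the proofs are below) =====
def Claim_equal_shortest_subarray_with_sum_at_least_target : Prop := ∀ (nums : List Int) (target : Int), Dom_shortest_subarray_with_sum_at_least_target nums target → Spec_shortest_subarray_with_sum_at_least_target nums target (shortest_subarray_with_sum_at_least_target nums target)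

-- ===== LEMMAS AND PROOFS =====

-- (i, j) is a candidate pair: the subarray nums[i:j] has sum ≥ target
def Cand (P : List Int) (t : Int) (i j : Nat) : Prop :=
  i ≤ j ∧ j < P.length ∧ t ≤ P.getD j 0 - P.getD i 0

-- o is the minimum candidate length over the pairs in S (none = no candidate in S)
def PvAcc (P : List Int) (t : Int) (o : Option Nat) (S : Nat → Nat → Prop) : Prop :=
  (∀ i j, S i j → Cand P t i j → ∃ m, o = some m ∧ m ≤ j - i) ∧
  (∀ m, o = some m → ∃ i j, S i j ∧ Cand P t i j ∧ j - i = m)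

def PvIsMin (P : List Int) (t : Int) (o : Option Nat) : Prop := PvAcc P t o (fun _ _ => True)

lemma pvIsMin_unique {P : List Int} {t : Int} {o1 o2 : Option Nat}
    (h1 : PvIsMin P t o1) (h2 : PvIsMin P t o2) : o1 = o2 := by
  obtain ⟨l1, a1⟩ := h1
  obtain ⟨l2, a2⟩ := h2
  match o1, o2 with
  | none, none => rfl
  | none, some m =>
    obtain ⟨i, j, _, hc, _⟩ := a2 m rfl
    obtain ⟨m', hm', _⟩ := l1 i j trivial hc
    exact absurd hm' (by simp)
  | some m, none =>
    obtain ⟨i, j, _, hc, _⟩ := a1 m rfl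
    obtain ⟨m', hm', _⟩ := l2 i j trivial hc
    exact absurd hm' (by simp)
  | some m1, some m2 =>
    obtain ⟨i, j, _, hc, he⟩ := a1 m1 rfl
    obtain ⟨m2', hm2', hle2⟩ := l2 i j trivial hc
    obtain ⟨i', j', _, hc', he'⟩ := a2 m2 rfl
    obtain ⟨m1', hm1', hle1⟩ := l1 i' j' trivial hc'
    simp only [Option.some.injEq] at hm1' hm2' ⊢
    omega

-- ----- prefix arrays agree -----
lemma prefix_eq_aux (nums : List Int) : ∀ (p : List Int) (s : Int), p ≠ [] → p.getLast? = some s →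
    nums.foldl (fun p num => p ++ [PySem.List.pyGetD p (-1) 0 + num]) p
      = (nums.foldl (fun (sp : Int × List Int) x => (sp.1 + x, sp.2 ++ [sp.1 + x])) (s, p)).2 := by
  induction nums with
  | nil => intro p s _ _; rfl
  | cons x xs ih =>
    intro p s hne hlast
    simp only [List.foldl_cons]
    have hget : PySem.List.pyGetD p (-1) 0 = s := by
      rw [PySem.List.pyGetD_neg_one p 0 hne]
      have := List.getLast?_eq_some_getLast (l := p) hne
      rw [this] at hlast
      exact Option.some.inj hlast
    rw [hget]
    exact ih (p ++ [s + x]) (s + x) (by simp) (by simp)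

lemma prefix_eq (nums : List Int) : aPrefix nums = bPrefix nums := by
  unfold aPrefix bPrefix
  exact prefix_eq_aux nums [0] 0 (by simp) rfl

-- ----- B computes the minimum -----
lemma bUpd_acc {P : List Int} {t : Int} {o : Option Nat} {S : Nat → Nat → Prop}
    (h : PvAcc P t o S) (j i : Nat) (hij : i ≤ j) (hjl : j < P.length) :
    PvAcc P t (bUpd P t j o i) (fun a b => S a b ∨ (a = i ∧ b = j)) := by
  obtain ⟨hlo, hac⟩ := h
  by_cases hc : P.getD j 0 - P.getD i 0 ≥ t
  · have hcand : Cand P t i j := ⟨hij, hjl, hc⟩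
    match o with
    | none =>
      refine ⟨?_, ?_⟩
      · intro a b hab hcab
        rcases hab with hab | ⟨ha, hb⟩
        · obtain ⟨m, hm, _⟩ := hlo a b hab hcab
          exact absurd hm (by simp)
        · exact ⟨j - i, by simp only [bUpd, if_pos hc], by omega⟩
      · intro m hm
        simp only [bUpd, if_pos hc, Option.some.injEq] at hm
        exact ⟨i, j, Or.inr ⟨rfl, rfl⟩, hcand, hm⟩
    | some m0 =>
      by_cases hlt : j - i < m0
      · refine ⟨?_, ?_⟩
        · intro a b hab hcab
          rcases hab with hab | ⟨ha, hb⟩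
          · obtain ⟨m, hm, hmle⟩ := hlo a b hab hcab
            refine ⟨j - i, by simp only [bUpd, if_pos hc, if_pos hlt], ?_⟩
            simp only [Option.some.injEq] at hm; omega
          · exact ⟨j - i, by simp only [bUpd, if_pos hc, if_pos hlt], by simp [ha, hb]⟩
        · intro m hm
          simp only [bUpd, if_pos hc, if_pos hlt, Option.some.injEq] at hm
          exact ⟨i, j, Or.inr ⟨rfl, rfl⟩, hcand, hm⟩
      · refine ⟨?_, ?_⟩
        · intro a b hab hcab
          rcases hab with hab | ⟨ha, hb⟩
          · obtain ⟨m, hm, hmle⟩ := hlo a b hab hcab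
            refine ⟨m0, by simp only [bUpd, if_pos hc, if_neg hlt], ?_⟩
            simp only [Option.some.injEq] at hm; omega
          · exact ⟨m0, by simp only [bUpd, if_pos hc, if_neg hlt], by subst ha; subst hb; omega⟩
        · intro m hm
          simp only [bUpd, if_pos hc, if_neg hlt, Option.some.injEq] at hm
          obtain ⟨a, b, hab, hcab, he⟩ := hac m0 rfl
          exact ⟨a, b, Or.inl hab, hcab, by omega⟩
  · have hres : bUpd P t j o i = o := by simp only [bUpd, if_neg hc]
    rw [hres]
    refine ⟨?_, ?_⟩
    · intro a b hab hcab
      rcases hab with hab | ⟨ha, hb⟩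
      · exact hlo a b hab hcab
      · subst ha; subst hb; exact absurd hcab.2.2 (by omega)
    · intro m hm
      obtain ⟨a, b, hab, hcab, he⟩ := hac m hm
      exact ⟨a, b, Or.inl hab, hcab, he⟩

lemma pvAcc_iff {P : List Int} {t : Int} {o : Option Nat} {S S' : Nat → Nat → Prop}
    (h : PvAcc P t o S) (hS : ∀ a b, S a b ↔ S' a b) : PvAcc P t o S' := by
  obtain ⟨hlo, hac⟩ := h
  refine ⟨fun a b hab => hlo a b ((hS a b).mpr hab), fun m hm => ?_⟩
  obtain ⟨a, b, hab, hc, he⟩ := hac m hm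
  exact ⟨a, b, (hS a b).mp hab, hc, he⟩

lemma bInner (P : List Int) (t : Int) (j : Nat) (hjl : j < P.length) :
    ∀ n, n ≤ j + 1 → ∀ (o : Option Nat) (S : Nat → Nat → Prop), PvAcc P t o S →
    PvAcc P t ((List.range n).foldl (fun acc2 i => bUpd P t j acc2 i) o)
      (fun a b => S a b ∨ (b = j ∧ a < n)) := by
  intro n
  induction n with
  | zero =>
    intro _ o S h
    exact pvAcc_iff h (by intro a b; simp)
  | succ n ih =>
    intro hn o S h
    rw [List.range_succ, List.foldl_append, List.foldl_cons, List.foldl_nil]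
    have h1 := ih (by omega) o S h
    have h2 := bUpd_acc h1 j n (by omega) hjl
    refine pvAcc_iff h2 ?_
    intro a b
    constructor
    · rintro ((hx | ⟨hb, ha⟩) | ⟨ha, hb⟩)
      · exact Or.inl hx
      · exact Or.inr ⟨hb, by omega⟩
      · exact Or.inr ⟨hb, by omega⟩
    · rintro (hx | ⟨hb, ha⟩)
      · exact Or.inl (Or.inl hx)
      · by_cases han : a = n
        · exact Or.inr ⟨han, hb⟩
        · exact Or.inl (Or.inr ⟨hb, by omega⟩)

lemma bFold_pvIsMin (P : List Int) (t : Int) :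
    PvIsMin P t ((List.range P.length).foldl
      (fun acc j => (List.range (j + 1)).foldl (fun acc2 i => bUpd P t j acc2 i) acc) none) := by
  have main : ∀ k, k ≤ P.length →
      PvAcc P t ((List.range k).foldl
        (fun acc j => (List.range (j + 1)).foldl (fun acc2 i => bUpd P t j acc2 i) acc) none)
        (fun a b => b < k ∧ a ≤ b) := by
    intro k
    induction k with
    | zero =>
      intro _
      exact ⟨fun a b hab _ => absurd hab.1 (by omega), fun m hm => by simp at hm⟩
    | succ k ih =>
      intro hk
      rw [List.range_succ, List.foldl_append, List.foldl_cons, List.foldl_nil]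
      have h1 := ih (by omega)
      have h2 := bInner P t k (by omega) (k + 1) le_rfl _ _ h1
      exact pvAcc_iff h2 (by intro a b; omega)
  have h := main P.length le_rfl
  obtain ⟨hlo, hac⟩ := h
  refine ⟨fun a b _ hc => hlo a b ⟨hc.2.1, hc.1⟩ hc, fun m hm => ?_⟩
  obtain ⟨a, b, _, hc, he⟩ := hac m hm
  exact ⟨a, b, trivial, hc, he⟩

-- ----- A's deque loop: invariant -----
def PvInv (P : List Int) (t : Int) (j : Nat) (dq : List Nat) (ml : Option Nat) : Prop :=
  dq.Pairwise (fun a b => a < b ∧ P.getD a 0 < P.getD b 0) ∧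
  (∀ i ∈ dq, i < j) ∧
  (∀ i j', Cand P t i j' → j' < j → ∃ m, ml = some m ∧ m ≤ j' - i) ∧
  (∀ m, ml = some m → ∃ i j', Cand P t i j' ∧ j' < j ∧ j' - i = m) ∧
  (∀ i, i < j → i ∉ dq → (∃ i' ∈ dq, i < i' ∧ P.getD i' 0 ≤ P.getD i 0) ∨
      (∃ m, ml = some m ∧ m + i + 1 ≤ j))

lemma popBackRev_spec (P : List Int) (pj : Int) (l : List Nat) :
    ∃ dropped, l = dropped ++ popBackRev P pj l ∧ (∀ i ∈ dropped, pj ≤ P.getD i 0) ∧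
      (∀ h, (popBackRev P pj l).head? = some h → P.getD h 0 < pj) := by
  induction l with
  | nil => exact ⟨[], by simp [popBackRev]⟩
  | cons b rest ih =>
    by_cases hc : pj ≤ P.getD b 0
    · obtain ⟨d, hd, hall, hh⟩ := ih
      refine ⟨b :: d, ?_, ?_, ?_⟩
      · rw [popBackRev, if_pos hc, List.cons_append, ← hd]
      · intro i hi
        rcases List.mem_cons.mp hi with hi | hi
        · exact hi ▸ hc
        · exact hall i hi
      · rw [popBackRev, if_pos hc]; exact hh
    · refine ⟨[], ?_, by simp, ?_⟩
      · rw [popBackRev, if_neg hc]; simp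
      · intro h hh
        rw [popBackRev, if_neg hc] at hh
        simp only [List.head?_cons, Option.some.injEq] at hh
        subst hh; omega

lemma popBack_spec (P : List Int) (pj : Int) (dq : List Nat) :
    ∃ dropped, dq = popBack P pj dq ++ dropped ∧ (∀ i ∈ dropped, pj ≤ P.getD i 0) ∧
      (∀ b, (popBack P pj dq).getLast? = some b → P.getD b 0 < pj) := by
  obtain ⟨d, hd, hall, hh⟩ := popBackRev_spec P pj dq.reverse
  refine ⟨d.reverse, ?_, fun i hi => hall i (by simpa using hi), ?_⟩
  · have := congrArg List.reverse hd
    simpa [popBack] using this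
  · intro b hb
    apply hh
    simpa [popBack, List.getLast?_reverse] using hb

lemma mlUpd_le_some (cl : Nat) (ml : Option Nat) (m : Nat) (hm : ml = some m) :
    ∃ c, mlUpd cl ml = some c ∧ c ≤ m := by
  subst hm
  by_cases hlt : cl < m
  · exact ⟨cl, by simp [mlUpd, hlt], by omega⟩
  · exact ⟨m, by simp [mlUpd, hlt], le_rfl⟩

lemma mlUpd_le_cl (cl : Nat) (ml : Option Nat) : ∃ c, mlUpd cl ml = some c ∧ c ≤ cl := by
  cases ml with
  | none => exact ⟨cl, rfl, le_rfl⟩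
  | some m =>
    by_cases hlt : cl < m
    · exact ⟨cl, by simp [mlUpd, hlt], le_rfl⟩
    · exact ⟨m, by simp [mlUpd, hlt], by omega⟩

lemma mlUpd_src (cl : Nat) (ml : Option Nat) (c : Nat) (hc : mlUpd cl ml = some c) :
    ml = some c ∨ c = cl := by
  cases ml with
  | none => simp [mlUpd] at hc; exact Or.inr hc.symm
  | some m =>
    by_cases hlt : cl < m
    · simp [mlUpd, hlt] at hc; exact Or.inr hc.symm
    · simp [mlUpd, hlt] at hc; exact Or.inl (by rw [hc])

lemma popFront_spec (P : List Int) (t pj : Int) (j : Nat) :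
    ∀ (dq : List Nat) (ml : Option Nat),
    ∃ popped,
      dq = popped ++ (popFront P t pj j dq ml).1 ∧
      (∀ i ∈ popped, pj - P.getD i 0 ≥ t) ∧
      (∀ h, ((popFront P t pj j dq ml).1).head? = some h → pj - P.getD h 0 < t) ∧
      (∀ m, ml = some m → ∃ m', (popFront P t pj j dq ml).2 = some m' ∧ m' ≤ m) ∧
      (∀ i ∈ popped, ∃ m', (popFront P t pj j dq ml).2 = some m' ∧ m' ≤ j - i) ∧
      (∀ m', (popFront P t pj j dq ml).2 = some m' → ml = some m' ∨ ∃ i ∈ popped, j - i = m') := by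
  intro dq
  induction dq with
  | nil =>
    intro ml
    exact ⟨[], rfl, by simp, by simp [popFront], fun m hm => ⟨m, hm, le_rfl⟩, by simp,
      fun m' hm' => Or.inl hm'⟩
  | cons i rest ih =>
    intro ml
    by_cases hc : pj - P.getD i 0 ≥ t
    · have heq : popFront P t pj j (i :: rest) ml = popFront P t pj j rest (mlUpd (j - i) ml) := by
        simp only [popFront, if_pos hc]
      obtain ⟨pp, hdec, hcond, hhead, hmm, hpm, hsrc⟩ := ih (mlUpd (j - i) ml)
      rw [heq]
      refine ⟨i :: pp, by simpa using hdec, ?_, hhead, ?_, ?_, ?_⟩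
      · intro a ha
        rcases List.mem_cons.mp ha with ha | ha
        · exact ha ▸ hc
        · exact hcond a ha
      · intro m hm
        obtain ⟨c, hcc, hcm⟩ := mlUpd_le_some (j - i) ml m hm
        obtain ⟨m', hm', hle⟩ := hmm c hcc
        exact ⟨m', hm', by omega⟩
      · intro a ha
        rcases List.mem_cons.mp ha with ha | ha
        · subst ha
          obtain ⟨c, hcc, hcle⟩ := mlUpd_le_cl (j - a) ml
          obtain ⟨m', hm', hle⟩ := hmm c hcc
          exact ⟨m', hm', by omega⟩
        · exact hpm a ha
      · intro m' hm'
        rcases hsrc m' hm' with hl | ⟨a, ha, he⟩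
        · rcases mlUpd_src (j - i) ml m' hl with hl2 | hl2
          · exact Or.inl hl2
          · exact Or.inr ⟨i, List.mem_cons_self, hl2.symm⟩
        · exact Or.inr ⟨a, List.mem_cons_of_mem _ ha, he⟩
    · have heq : popFront P t pj j (i :: rest) ml = (i :: rest, ml) := by
        simp only [popFront, if_neg hc]
      rw [heq]
      refine ⟨[], rfl, by simp, ?_, fun m hm => ⟨m, hm, le_rfl⟩, by simp, fun m' hm' => Or.inl hm'⟩
      intro h hh
      simp only [List.head?_cons, Option.some.injEq] at hh
      subst hh; omega

lemma aStep_pvInv {P : List Int} {t : Int} {j : Nat} {dq : List Nat} {ml : Option Nat}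
    (hInv : PvInv P t j dq ml) (hj : j < P.length) :
    PvInv P t (j + 1) (aStep P t (dq, ml) j).1 (aStep P t (dq, ml) j).2 := by
  obtain ⟨hpw, hlt, hlow, hach, hfut⟩ := hInv
  have hstep : aStep P t (dq, ml) j
      = popFront P t (P.getD j 0) j (popBack P (P.getD j 0) dq ++ [j]) ml := rfl
  rw [hstep]
  obtain ⟨db, hdb, hdb_all, hkept_last⟩ := popBack_spec P (P.getD j 0) dq
  -- facts about the kept part of the deque
  have hkept_sub : ∀ a ∈ popBack P (P.getD j 0) dq, a ∈ dq :=
    fun a ha => hdb ▸ List.mem_append_left _ ha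
  have hkept_lt : ∀ a ∈ popBack P (P.getD j 0) dq, a < j := fun a ha => hlt a (hkept_sub a ha)
  have hkept_pw : (popBack P (P.getD j 0) dq).Pairwise (fun a b => a < b ∧ P.getD a 0 < P.getD b 0) := by
    rw [hdb] at hpw; exact hpw.sublist (List.sublist_append_left _ _)
  have hkept_P : ∀ a ∈ popBack P (P.getD j 0) dq, P.getD a 0 < P.getD j 0 := by
    rcases List.eq_nil_or_concat (popBack P (P.getD j 0) dq) with h | ⟨l', b, h⟩
    · intro a ha
      rw [h] at ha
      simp at ha
    · rw [List.concat_eq_append] at h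
      intro a ha
      have hb : P.getD b 0 < P.getD j 0 := hkept_last b (by rw [h]; simp)
      rw [h] at ha hkept_pw
      rcases List.mem_append.mp ha with ha | ha
      · have h2 := (List.pairwise_append.mp hkept_pw).2.2 a ha b (by simp)
        exact lt_trans h2.2 hb
      · simp only [List.mem_singleton] at ha
        rw [ha]; exact hb
  have hdq2_pw : (popBack P (P.getD j 0) dq ++ [j]).Pairwise
      (fun a b => a < b ∧ P.getD a 0 < P.getD b 0) := by
    rw [List.pairwise_append]
    refine ⟨hkept_pw, by simp, ?_⟩
    intro a ha b hb
    simp only [List.mem_singleton] at hb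
    subst hb
    exact ⟨hkept_lt a ha, hkept_P a ha⟩
  have hdq2_le : ∀ a ∈ popBack P (P.getD j 0) dq ++ [j], a ≤ j := by
    intro a ha
    rcases List.mem_append.mp ha with h | h
    · exact le_of_lt (hkept_lt a h)
    · simp only [List.mem_singleton] at h; omega
  obtain ⟨pp, hpp, hppcond, hhead, hmlml, hppml, hmlsrc⟩ :=
    popFront_spec P t (P.getD j 0) j (popBack P (P.getD j 0) dq ++ [j]) ml
  have hpp_sub : ∀ a ∈ pp, a ∈ popBack P (P.getD j 0) dq ++ [j] :=
    fun a ha => hpp ▸ List.mem_append_left _ ha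
  have hres_sub : ∀ a ∈ (popFront P t (P.getD j 0) j (popBack P (P.getD j 0) dq ++ [j]) ml).1,
      a ∈ popBack P (P.getD j 0) dq ++ [j] :=
    fun a ha => hpp ▸ List.mem_append_right _ ha
  -- an element of dq2 whose pop condition holds must have been popped
  have hmem_pop : ∀ i ∈ popBack P (P.getD j 0) dq ++ [j], t ≤ P.getD j 0 - P.getD i 0 → i ∈ pp := by
    intro i hi hc
    rcases List.mem_append.mp (hpp ▸ hi) with h | h
    · exact h
    · exfalso
      match hr : (popFront P t (P.getD j 0) j (popBack P (P.getD j 0) dq ++ [j]) ml).1 with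
      | [] => rw [hr] at h; simp at h
      | hh :: tl =>
        have hfail := hhead hh (by rw [hr]; rfl)
        rw [hr] at h
        have hrest_pw : (hh :: tl).Pairwise (fun a b => a < b ∧ P.getD a 0 < P.getD b 0) := by
          rw [hpp, hr] at hdq2_pw
          exact hdq2_pw.sublist (List.sublist_append_right _ _)
        rcases List.mem_cons.mp h with h | h
        · subst h; omega
        · have := (List.pairwise_cons.mp hrest_pw).1 i h
          omega
  have hj_dq2 : j ∈ popBack P (P.getD j 0) dq ++ [j] := List.mem_append_right _ (by simp)
  -- if target ≤ 0 then j pops itself and the minimum drops to 0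
  have hzero : t ≤ 0 →
      ∃ m', (popFront P t (P.getD j 0) j (popBack P (P.getD j 0) dq ++ [j]) ml).2 = some m' ∧ m' = 0 := by
    intro ht
    have : j ∈ pp := hmem_pop j hj_dq2 (by omega)
    obtain ⟨m', hm', hle⟩ := hppml j this
    exact ⟨m', hm', by omega⟩
  refine ⟨?_, ?_, ?_, ?_, ?_⟩
  · -- pairwise
    rw [hpp] at hdq2_pw
    exact hdq2_pw.sublist (List.sublist_append_right _ _)
  · -- indices < j+1
    intro i hi
    have := hdq2_le i (hres_sub i hi)
    omega
  · -- lower bound for all candidates with j' < j+1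
    intro i j' hc hj'
    rcases Nat.lt_succ_iff_lt_or_eq.mp hj' with hlt' | rfl
    · obtain ⟨m, hm, hle⟩ := hlow i j' hc hlt'
      obtain ⟨m', hm', hle'⟩ := hmlml m hm
      exact ⟨m', hm', by omega⟩
    ·
      obtain ⟨hij, _, hcij⟩ := hc
      by_cases hi2 : i ∈ popBack P (P.getD j' 0) dq ++ [j']
      · obtain ⟨m', hm', hle⟩ := hppml i (hmem_pop i hi2 hcij)
        exact ⟨m', hm', hle⟩
      · by_cases hidq : i ∈ dq
        · -- i was popped from the back this step: P[j] ≤ P[i], so target ≤ 0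
          have hidb : i ∈ db := by
            rcases List.mem_append.mp (hdb ▸ hidq) with h | h
            · exact absurd (List.mem_append_left _ h) hi2
            · exact h
          have hPi := hdb_all i hidb
          obtain ⟨m', hm', hm0⟩ := hzero (by omega)
          exact ⟨m', hm', by omega⟩
        · have hij' : i < j' := by
            rcases Nat.lt_or_ge i j' with h | h
            · exact h
            · exfalso
              have hieq : i = j' := by omega
              subst hieq
              exact hi2 hj_dq2
          rcases hfut i hij' hidq with ⟨i', hi'dq, hii', hPi'⟩ | ⟨m, hm, hb⟩
          · rcases List.mem_append.mp (hdb ▸ hi'dq) with hk | hk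
            · -- dominator survived popBack: it pops in front now
              have hi'pp : i' ∈ pp :=
                hmem_pop i' (List.mem_append_left _ hk) (by omega)
              obtain ⟨m', hm', hle⟩ := hppml i' hi'pp
              have hi'j : i' < j' := hkept_lt i' hk
              exact ⟨m', hm', by omega⟩
            · -- dominator popped from the back: target ≤ 0
              have hPi := hdb_all i' hk
              obtain ⟨m', hm', hm0⟩ := hzero (by omega)
              exact ⟨m', hm', by omega⟩
          · obtain ⟨m', hm', hle⟩ := hmlml m hm
            exact ⟨m', hm', by omega⟩
  · -- every recorded value is a candidate length
    intro m hm
    rcases hmlsrc m hm with hl | ⟨i, hipp, he⟩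
    · obtain ⟨i, j', hc, hj', he⟩ := hach m hl
      exact ⟨i, j', hc, by omega, he⟩
    · have hi2 := hpp_sub i hipp
      exact ⟨i, j, ⟨hdq2_le i hi2, hj, by have := hppcond i hipp; omega⟩, by omega, he⟩
  · -- future-completeness
    intro i hij1 hiR
    by_cases hipp : i ∈ pp
    · obtain ⟨m', hm', hle⟩ := hppml i hipp
      have : i ≤ j := hdq2_le i (hpp_sub i hipp)
      exact Or.inr ⟨m', hm', by omega⟩
    · have hi2 : i ∉ popBack P (P.getD j 0) dq ++ [j] := by
        intro h
        rcases List.mem_append.mp (hpp ▸ h) with h | h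
        · exact hipp h
        · exact hiR h
      have hinej : i ≠ j := fun h => hi2 (h ▸ hj_dq2)
      have hij' : i < j := by omega
      by_cases hidq : i ∈ dq
      · -- popped from the back this step: j dominates i
        have hidb : i ∈ db := by
          rcases List.mem_append.mp (hdb ▸ hidq) with h | h
          · exact absurd (List.mem_append_left _ h) hi2
          · exact h
        have hPi := hdb_all i hidb
        by_cases hjR : j ∈ (popFront P t (P.getD j 0) j (popBack P (P.getD j 0) dq ++ [j]) ml).1
        · exact Or.inl ⟨j, hjR, hij', by omega⟩
        · have hjpp : j ∈ pp := by
            rcases List.mem_append.mp (hpp ▸ hj_dq2) with h | h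
            · exact h
            · exact absurd h hjR
          obtain ⟨m', hm', hle⟩ := hppml j hjpp
          exact Or.inr ⟨m', hm', by omega⟩
      · rcases hfut i hij' hidq with ⟨i', hi'dq, hii', hPi'⟩ | ⟨m, hm, hb⟩
        · rcases List.mem_append.mp (hdb ▸ hi'dq) with hk | hk
          · by_cases hi'R : i' ∈ (popFront P t (P.getD j 0) j (popBack P (P.getD j 0) dq ++ [j]) ml).1
            · exact Or.inl ⟨i', hi'R, hii', hPi'⟩
            · have hi'pp : i' ∈ pp := by
                rcases List.mem_append.mp (hpp ▸ List.mem_append_left [j] hk) with h | h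
                · exact h
                · exact absurd h hi'R
              obtain ⟨m', hm', hle⟩ := hppml i' hi'pp
              have hi'j : i' < j := hkept_lt i' hk
              exact Or.inr ⟨m', hm', by omega⟩
          · have hPi := hdb_all i' hk
            by_cases hjR : j ∈ (popFront P t (P.getD j 0) j (popBack P (P.getD j 0) dq ++ [j]) ml).1
            · exact Or.inl ⟨j, hjR, hij', by omega⟩
            · have hjpp : j ∈ pp := by
                rcases List.mem_append.mp (hpp ▸ hj_dq2) with h | h
                · exact h
                · exact absurd h hjR
              obtain ⟨m', hm', hle⟩ := hppml j hjpp
              exact Or.inr ⟨m', hm', by omega⟩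
        · obtain ⟨m', hm', hle⟩ := hmlml m hm
          exact Or.inr ⟨m', hm', by omega⟩

lemma aFold_pvInv (P : List Int) (t : Int) : ∀ k, k ≤ P.length →
    PvInv P t k ((List.range k).foldl (aStep P t) ([], none)).1
              ((List.range k).foldl (aStep P t) ([], none)).2 := by
  intro k
  induction k with
  | zero =>
    intro _
    refine ⟨by simp, by simp, ?_, by simp, by simp⟩
    intro i j' _ h; omega
  | succ k ih =>
    intro hk
    rw [List.range_succ, List.foldl_append]
    have h1 := ih (by omega)
    simpa using aStep_pvInv h1 (by omega)

lemma aResult_pvIsMin (P : List Int) (t : Int) :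
    PvIsMin P t ((List.range P.length).foldl (aStep P t) ([], none)).2 := by
  obtain ⟨_, _, hlow, hach, _⟩ := aFold_pvInv P t P.length le_rfl
  constructor
  · intro i j _ hc
    exact hlow i j hc hc.2.1
  · intro m hm
    obtain ⟨i, j', hc, _, he⟩ := hach m hm
    exact ⟨i, j', trivial, hc, he⟩

-- ===== VERDICT (by name: the statement is the Claim_ definition above) =====
theorem shortest_subarray_with_sum_at_least_target_spec : Claim_equal_shortest_subarray_with_sum_at_least_target := by
  intro nums target _
  unfold Spec_shortest_subarray_with_sum_at_least_target
  unfold shortest_subarray_with_sum_at_least_target shortest_subarray_with_sum_at_least_target_alt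
  rw [prefix_eq]
  have h := pvIsMin_unique (aResult_pvIsMin (bPrefix nums) target) (bFold_pvIsMin (bPrefix nums) target)
  simp only [h]
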